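-- pv_equiv track=rewrite | github.com/EagerProgrammer/CodingTest-Python- | 0622.py | solution
-- ===== SOURCE A (Python) =====
-- def solution(k, m, score):
--     answer = 0
--     score.sort(reverse=True)
--     x = len(score)
--     for j in range(1,(x//m)+1):
--         temp = score[m*j-m:m*j]
--         if max(temp) > k:
--             continue
--         else:
--             answer += min(temp)*m
--     return answer
-- ===== SOURCE B (Python) =====
-- def solution(k, m, score):
--     # sorts score in place (descending), like the original
--     score.sort(reverse=True)
--     g = len(score) // m
--     if g <= 0:
--         return 0
--     # binary search for the boundary: lo = number of elements strictly greater than k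
--     # (after the descending sort they form a prefix)
--     lo, hi = 0, len(score)
--     while lo < hi:
--         mid = (lo + hi) // 2
--         if score[mid] > k:
--             lo = mid + 1
--         else:
--             hi = mid
--     bad = -(-lo // m)            # ceil(lo / m) = groups touched by an element > k
--     total = 0
--     for i in range(m - 1 + bad * m, g * m, m):   # minima positions of the valid groups
--         total += score[i]
--     return total * m
-- ===== Notes on version B (the rewrite author's own statement) =====
-- stated objective: alternative
-- what changed: B replaces A's per-group slice/max()/min() scans with a binary search for the count of elements greater than k (a prefix after the descending sort), a ceiling division turning that count into the number of invalidated groups, and one stride-m index walk summing the surviving group minima.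
import Mathlib
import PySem

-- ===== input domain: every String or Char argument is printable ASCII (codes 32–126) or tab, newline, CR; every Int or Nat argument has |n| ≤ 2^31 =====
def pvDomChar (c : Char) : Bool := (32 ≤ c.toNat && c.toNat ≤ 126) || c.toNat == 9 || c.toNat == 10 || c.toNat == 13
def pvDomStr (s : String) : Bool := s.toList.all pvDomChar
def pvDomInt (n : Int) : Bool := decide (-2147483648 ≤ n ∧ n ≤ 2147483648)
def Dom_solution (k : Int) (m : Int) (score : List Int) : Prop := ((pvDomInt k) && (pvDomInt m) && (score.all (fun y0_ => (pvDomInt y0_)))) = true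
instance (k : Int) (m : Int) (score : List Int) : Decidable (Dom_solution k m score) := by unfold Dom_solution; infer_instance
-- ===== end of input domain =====

-- B replaces A's per-group slice + max()/min() scans by a binary search for the boundary of
-- elements > k (a prefix after the descending sort), a ceiling division giving the number of
-- invalidated groups, and one stride-m index walk over the surviving group minima (B sorts
-- `score` in place, descending, exactly as A does; the equivalence proved is about the return value).


-- ===== PORT A =====
def solution (k : Int) (m : Int) (score : List Int) : Int :=
  let s := PySem.List.sorted score (fun v => v) true
  let x : Int := s.length
  (PySem.List.pyRange 1 (PySem.Int.floordiv x m + 1) 1).foldl (fun answer j =>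
    let temp := PySem.List.slice s (some (m * j - m)) (some (m * j))
    if (PySem.List.max? temp (fun v => v)).getD 0 > k then
      answer
    else
      answer + (PySem.List.min? temp (fun v => v)).getD 0 * m) 0

-- ===== PORT B =====
-- Source B's `while lo < hi` binary-search loop, as structural recursion on hi - lo
-- (`PySem.Int.floordiv (lo + hi) 2` is Source B's `mid = (lo + hi) // 2`)
def pvBsearch (s : List Int) (k : Int) (lo hi : Int) : Int :=
  if h : lo < hi then
    if k < PySem.List.pyGetD s (PySem.Int.floordiv (lo + hi) 2) 0 then
      pvBsearch s k (PySem.Int.floordiv (lo + hi) 2 + 1) hi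
    else
      pvBsearch s k lo (PySem.Int.floordiv (lo + hi) 2)
  else lo
termination_by (hi - lo).toNat
decreasing_by
  · have hb := PySem.Int.floordiv_two_mid_bounds (le_of_lt h)
    omega
  · have hb := PySem.Int.floordiv_two_mid_bounds (le_of_lt h)
    have hlt : PySem.Int.floordiv (lo + hi) 2 < hi := by
      rw [PySem.Int.floordiv_eq_ediv_of_pos (by norm_num)]; omega
    omega

def solution_alt (k : Int) (m : Int) (score : List Int) : Int :=
  let s := PySem.List.sorted score (fun v => v) true
  let g := PySem.Int.floordiv (s.length : Int) m
  if g ≤ 0 then 0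
  else
    let lo := pvBsearch s k 0 (s.length : Int)
    let bad := -(PySem.Int.floordiv (-lo) m)
    ((PySem.List.pyRange (m - 1 + bad * m) (g * m) m).foldl
        (fun total i => total + PySem.List.pyGetD s i 0) 0) * m

-- ===== PRECONDITION & SPEC =====
-- Python A raises ZeroDivisionError exactly when m = 0 (the `x // m`); it returns on every other input.
def Pre_solution (k : Int) (m : Int) (score : List Int) : Prop := m ≠ 0
instance (k : Int) (m : Int) (score : List Int) : Decidable (Pre_solution k m score) := by
  unfold Pre_solution; infer_instance
def pvWitness_solution : Int × Int × List Int := (5, 2, [1, 7, 3, 2])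

def Spec_solution (k : Int) (m : Int) (score : List Int) (out : Int) : Prop := out = solution_alt k m score
instance (k : Int) (m : Int) (score : List Int) (out : Int) : Decidable (Spec_solution k m score out) := by unfold Spec_solution; infer_instance

-- ===== CLAIM (what is proved, stated in full; the proofs are below) =====
def Claim_equal_solution : Prop := ∀ (k : Int) (m : Int) (score : List Int), Dom_solution k m score → Pre_solution k m score → Spec_solution k m score (solution k m score)

-- ===== LEMMAS AND PROOFS =====

-- indexing a contiguous block of s
theorem block_getElem (s : List Int) (a t i : Nat) (h : i < ((s.drop a).take t).length) :
    ((s.drop a).take t)[i] = s[a + i]'(by simp at h; omega) := by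
  rw [List.getElem_take, List.getElem_drop]

-- max of a nonempty contiguous block of a descending list is its first element
theorem max_slice (s : List Int) (hs : ∀ i j, (hij : i ≤ j) → (hj : j < s.length) → s[j] ≤ s[i]'(by omega))
    (a t : Nat) (ha : a < s.length) (ht : 0 < t) :
    PySem.List.max? ((s.drop a).take t) (fun v => v) = some (s[a]) := by
  have hlen : ((s.drop a).take t).length = min t (s.length - a) := by simp
  have hpos : 0 < ((s.drop a).take t).length := by omega
  rcases hv : PySem.List.max? ((s.drop a).take t) (fun v => v) with _ | v
  · rw [PySem.List.max?_eq_none_iff] at hv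
    simp [hv] at hpos
  · have hvmem := PySem.List.max?_mem hv
    have hvmax := PySem.List.max?_isMax hv
    obtain ⟨i, hi, hiv⟩ := List.getElem_of_mem hvmem
    rw [hlen, Nat.lt_min] at hi
    have h1 : v ≤ s[a] := by
      rw [block_getElem s a t i (by rw [hlen, Nat.lt_min]; omega)] at hiv
      rw [← hiv]
      exact hs a (a + i) (by omega) (by omega)
    have h2 : s[a] ≤ v := by
      have hmem := List.getElem_mem hpos
      rw [block_getElem s a t 0 hpos] at hmem
      simp only [Nat.add_zero] at hmem
      exact hvmax _ hmem
    rw [le_antisymm h1 h2]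

-- min of a full contiguous block of a descending list is its last element
theorem min_slice (s : List Int) (hs : ∀ i j, (hij : i ≤ j) → (hj : j < s.length) → s[j] ≤ s[i]'(by omega))
    (a t : Nat) (ht : 0 < t) (hat : a + t ≤ s.length) :
    PySem.List.min? ((s.drop a).take t) (fun v => v) = some (s[a + t - 1]'(by omega)) := by
  have hlen : ((s.drop a).take t).length = min t (s.length - a) := by simp
  have hpos : 0 < ((s.drop a).take t).length := by omega
  rcases hv : PySem.List.min? ((s.drop a).take t) (fun v => v) with _ | v
  · rw [PySem.List.min?_eq_none_iff] at hv
    simp [hv] at hpos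
  · have hvmem := PySem.List.min?_mem hv
    have hvmin := PySem.List.min?_isMin hv
    obtain ⟨i, hi, hiv⟩ := List.getElem_of_mem hvmem
    rw [hlen, Nat.lt_min] at hi
    have h1 : s[a + t - 1]'(by omega) ≤ v := by
      rw [block_getElem s a t i (by rw [hlen, Nat.lt_min]; omega)] at hiv
      rw [← hiv]
      exact hs (a + i) (a + t - 1) (by omega) (by omega)
    have h2 : v ≤ s[a + t - 1]'(by omega) := by
      have hlt : t - 1 < ((s.drop a).take t).length := by omega
      have hmem := List.getElem_mem hlt
      rw [block_getElem s a t (t - 1) hlt] at hmem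
      have heq : a + (t - 1) = a + t - 1 := by omega
      simp only [heq] at hmem
      exact hvmin _ hmem
    rw [le_antisymm h2 h1]

-- the binary search finds the boundary: everything strictly left of the result is > k,
-- everything from the result on is ≤ k (on a descending list, with the loop invariant)
theorem pvBsearch_spec (s : List Int) (k : Int)
    (hdesc : ∀ i j, (hij : i ≤ j) → (hj : j < s.length) → s[j] ≤ s[i]'(by omega)) :
    ∀ (n : Nat) (lo hi : Int), (hi - lo).toNat ≤ n → 0 ≤ lo → lo ≤ hi → hi ≤ (s.length : Int) →
    (∀ i : Nat, ((i : Int) < lo) → (h : i < s.length) → k < s[i]) →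
    (∀ i : Nat, (hi ≤ (i : Int)) → (h : i < s.length) → s[i] ≤ k) →
    lo ≤ pvBsearch s k lo hi ∧ pvBsearch s k lo hi ≤ hi ∧
      (∀ i : Nat, ((i : Int) < pvBsearch s k lo hi) → (h : i < s.length) → k < s[i]) ∧
      (∀ i : Nat, (pvBsearch s k lo hi ≤ (i : Int)) → (h : i < s.length) → s[i] ≤ k) := by
  intro n
  induction n with
  | zero =>
    intro lo hi hn h0 hle hhi hlow hhigh
    have hnlt : ¬ lo < hi := by omega
    rw [pvBsearch, dif_neg hnlt]
    exact ⟨le_rfl, hle, hlow, fun i hi' h => hhigh i (by omega) h⟩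
  | succ n ih =>
    intro lo hi hn h0 hle hhi hlow hhigh
    by_cases hlt : lo < hi
    · rw [pvBsearch, dif_pos hlt]
      obtain ⟨hm1, hm2⟩ := PySem.Int.floordiv_two_mid_bounds (le_of_lt hlt)
      set mid := PySem.Int.floordiv (lo + hi) 2 with hmid
      have hmlt : mid < hi := by
        rw [hmid, PySem.Int.floordiv_eq_ediv_of_pos (by norm_num)]; omega
      have h0m : 0 ≤ mid := le_trans h0 hm1
      have hmlen : mid < (s.length : Int) := lt_of_lt_of_le hmlt hhi
      have hget : PySem.List.pyGetD s mid 0 = s[mid.toNat]'(by omega) :=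
        PySem.List.pyGetD_eq_getElem s 0 h0m (by omega)
      split_ifs with hcmp
      · -- score[mid] > k : search right half
        have hrec := ih (mid + 1) hi (by omega) (by omega) (by omega) hhi
          (fun i hi' h => by
            by_cases hcase : (i : Int) < lo
            · exact hlow i hcase h
            · rw [hget] at hcmp
              exact lt_of_lt_of_le hcmp (hdesc i mid.toNat (by omega) (by omega)))
          hhigh
        exact ⟨le_trans hm1 (by omega), hrec.2.1, hrec.2.2.1, hrec.2.2.2⟩
      · -- score[mid] ≤ k : search left half
        have hrec := ih lo mid (by omega) h0 (by omega) (by omega) hlow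
          (fun i hi' h => by
            rw [hget] at hcmp
            exact le_trans (hdesc mid.toNat i (by omega) h) (by omega))
        exact ⟨hrec.1, le_trans hrec.2.1 (by omega), hrec.2.2.1, hrec.2.2.2⟩
    · rw [pvBsearch, dif_neg hlt]
      exact ⟨le_rfl, hle, hlow, fun i hi' h => hhigh i (by omega) h⟩

-- filtering an integer range by a left-closed lower bound keeps exactly the suffix
theorem filter_pyRange_ge (c b : Int) :
    ∀ (n : Nat) (a : Int), (b - a).toNat ≤ n →
    (PySem.List.pyRange a b 1).filter (fun x => decide (c < x)) = PySem.List.pyRange (max a (c + 1)) b 1 := by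
  intro n
  induction n with
  | zero =>
    intro a h
    rw [PySem.List.pyRange_one_eq_nil (by omega : b ≤ a),
        PySem.List.pyRange_one_eq_nil (by omega : b ≤ max a (c + 1))]
    rfl
  | succ n ih =>
    intro a h
    by_cases hab : b ≤ a
    · rw [PySem.List.pyRange_one_eq_nil hab,
          PySem.List.pyRange_one_eq_nil (by omega : b ≤ max a (c + 1))]
      rfl
    · rw [PySem.List.pyRange_one_cons (by omega : a < b)]
      by_cases hca : c < a
      · rw [List.filter_cons_of_pos (by simp [hca]), ih (a + 1) (by omega)]
        rw [show max (a + 1) (c + 1) = a + 1 by omega, show max a (c + 1) = a by omega]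
        rw [PySem.List.pyRange_one_cons (by omega : a < b)]
      · rw [List.filter_cons_of_neg (by simp [hca]), ih (a + 1) (by omega)]
        rw [show max (a + 1) (c + 1) = c + 1 by omega, show max a (c + 1) = c + 1 by omega]

-- the stride-m range of minima positions is the per-group index range, reindexed
theorem stride_pyRange (m : Int) (hm : 0 < m) (a b : Int) :
    PySem.List.pyRange (m - 1 + a * m) (b * m) m
      = (PySem.List.pyRange (a + 1) (b + 1) 1).map (fun j => j * m - 1) := by
  rw [PySem.List.pyRange_of_pos _ _ hm, PySem.List.pyRange_one, List.map_map]
  by_cases hab : a < b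
  · have hcond : m - 1 + a * m < b * m := by nlinarith
    have hnum : b * m - (m - 1 + a * m) + m - 1 = (b - a) * m := by ring
    rw [if_pos hcond, hnum, Int.mul_ediv_cancel _ (by omega : m ≠ 0)]
    rw [show b + 1 - (a + 1) = b - a by ring]
    apply List.map_congr_left
    intro t _
    simp only [Function.comp_apply]
    ring
  · have hcond : ¬ (m - 1 + a * m < b * m) := by nlinarith
    rw [if_neg hcond, show b + 1 - (a + 1) = b - a by ring,
        show (b - a).toNat = 0 by omega]
    rfl

theorem solution_eq_alt (k m : Int) (score : List Int) (hm : m ≠ 0) :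
    solution k m score = solution_alt k m score := by
  unfold solution solution_alt
  simp only []
  set s := PySem.List.sorted score (fun v => v) true with hs_def
  have hdesc : ∀ i j, (hij : i ≤ j) → (hj : j < s.length) → s[j] ≤ s[i]'(by omega) := by
    intro i j hij hj
    have hp := PySem.List.sorted_pairwise_rev (xs := score) (key := fun v => v)
    rw [← hs_def] at hp
    rw [List.pairwise_iff_getElem] at hp
    rcases Nat.eq_or_lt_of_le hij with h | h
    · subst h; rfl
    · exact hp i j (by omega) hj h
  set x : Int := (s.length : Int) with hx_def
  set g : Int := PySem.Int.floordiv x m with hg_def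
  have hx0 : (0:Int) ≤ x := by positivity
  by_cases hg : g ≤ 0
  · -- no full groups: A's loop range and B's answer are both empty/zero
    rw [PySem.List.pyRange_one_eq_nil (by omega : g + 1 ≤ 1), if_pos hg]
    rfl
  · rw [if_neg hg]
    have hpos : 0 < m := by
      rcases lt_or_gt_of_ne hm with hneg | hpos
      · exfalso
        apply hg
        have h1 := PySem.Int.floordiv_mul_add_mod x m
        have h2 := PySem.Int.mod_neg_bounds x hneg
        rw [← hg_def] at h1
        by_contra hgpos
        nlinarith
      · exact hpos
    have hgm : g * m ≤ x := by
      rw [hg_def, PySem.Int.floordiv_eq_ediv_of_pos hpos]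
      exact Int.ediv_mul_le x (by omega)
    -- the binary search result: the boundary between the > k prefix and the ≤ k suffix
    set lo : Int := pvBsearch s k 0 x with hlo_def
    have hspec := pvBsearch_spec s k hdesc (x.toNat) 0 x (by omega) le_rfl hx0 (by omega)
      (fun i hi' h => absurd hi' (by omega))
      (fun i hi' h => absurd hi' (by push_cast [hx_def]; omega))
    rw [← hlo_def] at hspec
    obtain ⟨hl0, hlx, hlow, hhigh⟩ := hspec
    set bad : Int := -(PySem.Int.floordiv (-lo) m) with hbad_def
    have hbadq : (bad - 1) * m < lo ∧ lo ≤ bad * m :=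
      (PySem.Int.neg_floordiv_neg_eq_iff_of_pos hpos).mp hbad_def.symm
    have hbad0 : 0 ≤ bad := by nlinarith [hbadq.2]
    -- per-group index bounds for j ∈ [1, g]
    have hbounds : ∀ j : Int, 1 ≤ j → j < g + 1 → 0 ≤ m * j - m ∧ m * j ≤ x := by
      intro j h1 h2
      constructor
      · nlinarith
      · nlinarith [mul_le_mul_of_nonneg_right (show j ≤ g by omega) hpos.le]
    -- A's loop body: group j contributes iff its leader ≤ k, i.e. iff bad < j
    have hbody : ∀ (answer : Int), ∀ j ∈ PySem.List.pyRange 1 (g + 1) 1,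
        (fun answer j =>
          let temp := PySem.List.slice s (some (m * j - m)) (some (m * j))
          if (PySem.List.max? temp (fun v => v)).getD 0 > k then answer
          else answer + (PySem.List.min? temp (fun v => v)).getD 0 * m) answer j
        = (fun answer j =>
            if bad < j then answer + PySem.List.pyGetD s (j * m - 1) 0 * m
            else answer) answer j := by
      intro answer j hj
      obtain ⟨hj1, hj2⟩ := PySem.List.mem_pyRange_one.mp hj
      obtain ⟨hb1, hb2⟩ := hbounds j hj1 hj2
      have hmj : m ≤ m * j := by nlinarith
      have htemp : PySem.List.slice s (some (m * j - m)) (some (m * j))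
          = (s.drop (m * j - m).toNat).take ((m * j).toNat - (m * j - m).toNat) :=
        PySem.List.slice_toNat s hb1 (by omega)
      have hT : (m * j).toNat - (m * j - m).toNat = m.toNat := by omega
      have hmax := max_slice s hdesc (m * j - m).toNat m.toNat (by omega) (by omega)
      have hmin := min_slice s hdesc (m * j - m).toNat m.toNat (by omega) (by omega)
      have hminv : PySem.List.pyGetD s (j * m - 1) 0 = s[(m * j - m).toNat + m.toNat - 1]'(by omega) := by
        rw [show j * m - 1 = m * j - 1 by ring]
        rw [PySem.List.pyGetD_eq_getElem s 0 (by omega) (by omega)]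
        congr 1
        omega
      -- the leader is > k exactly when its index lies left of the search boundary, i.e. j ≤ bad
      have hlead : (k < s[(m * j - m).toNat]'(by omega)) ↔ j ≤ bad := by
        constructor
        · intro hgt
          by_contra hje
          have hge : bad * m ≤ (j - 1) * m :=
            mul_le_mul_of_nonneg_right (by omega) hpos.le
          have : lo ≤ ((m * j - m).toNat : Int) := by
            have : ((m * j - m).toNat : Int) = (j - 1) * m := by
              rw [Int.toNat_of_nonneg hb1]; ring
            nlinarith [hbadq.2]
          exact absurd (hhigh (m * j - m).toNat this (by omega)) (by omega)
        · intro hje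
          apply hlow
          have h1 : (j - 1) * m ≤ (bad - 1) * m :=
            mul_le_mul_of_nonneg_right (by omega) hpos.le
          have h2 : ((m * j - m).toNat : Int) = (j - 1) * m := by
            rw [Int.toNat_of_nonneg hb1]; ring
          nlinarith [hbadq.1]
      simp only [htemp, hT, hmax, hmin, Option.getD_some, hminv]
      split_ifs with h1 h2 h2
      · exact absurd (hlead.mp h1) (by omega)
      · rfl
      · rfl
      · exact absurd (hlead.mpr (by omega)) (by omega)
    rw [PySem.List.foldl_congr_mem _ _ _ _ hbody]
    rw [PySem.List.foldl_ite_eq_foldl_filter (p := fun j => bad < j)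
      (f := fun acc j => acc + PySem.List.pyGetD s (j * m - 1) 0 * m)]
    rw [show (fun j => decide (bad < j)) = (fun x => decide (bad < x)) from rfl]
    rw [filter_pyRange_ge bad (g + 1) (g + 1 - 1).toNat 1 (by omega)]
    rw [show max 1 (bad + 1) = bad + 1 by omega]
    rw [PySem.List.foldl_add, PySem.List.foldl_add]
    rw [List.sum_map_mul_right]
    rw [stride_pyRange m hpos bad g, List.map_map]
    have hfun : ((fun i => PySem.List.pyGetD s i 0) ∘ fun j => j * m - 1)
        = fun j => PySem.List.pyGetD s (j * m - 1) 0 := rfl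
    rw [hfun]
    ring

-- ===== VERDICT (by name: the statement is the Claim_ definition above) =====
theorem solution_spec : Claim_equal_solution := by
  intro k m score _ hpre
  exact solution_eq_alt k m score hpre
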